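-- pv_equiv track=rewrite | github.com/EnzoUbaldoPetrocco/DataCollection | MainProgram/remove_bg.py | draw_discrete_circle_with_boundaries
-- ===== SOURCE A (Python) =====
-- def draw_discrete_circle_with_boundaries(x,y,r, xmax, ymax):
--     # Algorithm:
--     # - check which indeces falls in the equation:
--     # (x-x0)^2+(y-y0)^2=r^2
--     # obv I check only in a rxr matrix then i sum x0 and y0
--     indices = []
--     temp_indices = []
--     x = int(x)
--     y = int(y)
--     for x_i in range(-r,r+1):
--         for y_i in range(-r,r+1):
--             if x_i*x_i+y_i*y_i<=r*r:
--                 temp_indices.append([x_i+x,y_i+y])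
--     for i in temp_indices:
--         if i[0]>0 and i[0]<xmax and i[1]>0 and i[1]<ymax:
--             indices.append([i[0], i[1]])
--     return indices
-- ===== SOURCE B (Python) =====
-- def _isqrt(k):
--     # largest m >= 0 with m*m <= k (0 when k < 0)
--     m = 0
--     while (m + 1) * (m + 1) <= k:
--         m += 1
--     return m
--
-- def draw_discrete_circle_with_boundaries(x, y, r, xmax, ymax):
--     indices = []
--     x = int(x)
--     y = int(y)
--     for x_i in range(-r, r + 1):
--         m = _isqrt(r * r - x_i * x_i)
--         for y_i in range(-m, m + 1):
--             px = x_i + x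
--             py = y_i + y
--             if px > 0 and px < xmax and py > 0 and py < ymax:
--                 indices.append([px, py])
--     return indices
-- ===== Notes on version B (the rewrite author's own statement) =====
-- stated objective: alternative
-- what changed: B replaces A's two-pass scheme (scan the full (2r+1)x(2r+1) square testing membership, collect into a temp list, then filter bounds in a second pass) by computing the in-disk column span analytically with an integer square root and emitting bounded points directly in one pass with no temp list.
import Mathlib
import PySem

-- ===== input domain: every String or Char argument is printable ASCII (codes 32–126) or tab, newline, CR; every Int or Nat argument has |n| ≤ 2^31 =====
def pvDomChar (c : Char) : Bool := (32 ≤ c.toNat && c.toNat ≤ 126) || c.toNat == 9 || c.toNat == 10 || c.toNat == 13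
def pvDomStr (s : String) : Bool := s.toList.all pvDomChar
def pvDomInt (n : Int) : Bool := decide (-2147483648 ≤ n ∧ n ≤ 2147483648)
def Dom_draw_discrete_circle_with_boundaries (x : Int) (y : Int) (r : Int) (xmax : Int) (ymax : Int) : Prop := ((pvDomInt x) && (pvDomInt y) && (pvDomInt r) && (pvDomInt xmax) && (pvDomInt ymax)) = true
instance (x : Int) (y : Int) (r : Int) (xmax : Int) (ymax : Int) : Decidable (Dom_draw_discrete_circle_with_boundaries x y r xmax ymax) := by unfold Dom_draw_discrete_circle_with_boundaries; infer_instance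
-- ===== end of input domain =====

-- B computes each column's in-disk span with an integer square root and filters bounds in one
-- pass (no temp list); objective: alternative decomposition, same asymptotic cost.

-- ===== PORT A =====
def draw_discrete_circle_with_boundaries (x : Int) (y : Int) (r : Int) (xmax : Int) (ymax : Int) : List (List Int) :=
  -- x = int(x), y = int(y) are identities on Int
  let temp_indices : List (List Int) :=
    (PySem.List.pyRange (-r) (r + 1) 1).foldl (fun acc x_i =>
      (PySem.List.pyRange (-r) (r + 1) 1).foldl (fun acc2 y_i =>
        if x_i * x_i + y_i * y_i ≤ r * r then acc2 ++ [[x_i + x, y_i + y]] else acc2) acc) []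
  temp_indices.foldl (fun acc i =>
    if PySem.List.pyGetD i 0 0 > 0 ∧ PySem.List.pyGetD i 0 0 < xmax ∧
       PySem.List.pyGetD i 1 0 > 0 ∧ PySem.List.pyGetD i 1 0 < ymax then
      acc ++ [[PySem.List.pyGetD i 0 0, PySem.List.pyGetD i 1 0]]
    else acc) []

-- ===== PORT B =====
-- _isqrt's while loop; m and k are nonnegative at every Python call site, so the Nat recursion is
-- exact (and for k < 0 both the Python loop and toNat give 0).
def pyIsqrtAux (k : Nat) (m : Nat) : Nat :=
  if (m + 1) * (m + 1) ≤ k then pyIsqrtAux k (m + 1) else m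
termination_by k - m
decreasing_by have : m + 1 ≤ k := le_trans (by nlinarith) ‹(m + 1) * (m + 1) ≤ k›; omega

def pyIsqrt (k : Int) : Int := (pyIsqrtAux k.toNat 0 : Int)

def draw_discrete_circle_with_boundaries_alt (x : Int) (y : Int) (r : Int) (xmax : Int) (ymax : Int) : List (List Int) :=
  (PySem.List.pyRange (-r) (r + 1) 1).foldl (fun acc x_i =>
    let m := pyIsqrt (r * r - x_i * x_i)
    (PySem.List.pyRange (-m) (m + 1) 1).foldl (fun acc2 y_i =>
      let px := x_i + x
      let py := y_i + y
      if px > 0 ∧ px < xmax ∧ py > 0 ∧ py < ymax then acc2 ++ [[px, py]] else acc2) acc) []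

-- ===== PRECONDITION & SPEC =====
def Spec_draw_discrete_circle_with_boundaries (x : Int) (y : Int) (r : Int) (xmax : Int) (ymax : Int) (out : List (List Int)) : Prop := out = draw_discrete_circle_with_boundaries_alt x y r xmax ymax
instance (x : Int) (y : Int) (r : Int) (xmax : Int) (ymax : Int) (out : List (List Int)) : Decidable (Spec_draw_discrete_circle_with_boundaries x y r xmax ymax out) := by unfold Spec_draw_discrete_circle_with_boundaries; infer_instance

-- ===== CLAIM (what is proved, stated in full; the proofs are below) =====
def Claim_equal_draw_discrete_circle_with_boundaries : Prop := ∀ (x : Int) (y : Int) (r : Int) (xmax : Int) (ymax : Int), Dom_draw_discrete_circle_with_boundaries x y r xmax ymax → Spec_draw_discrete_circle_with_boundaries x y r xmax ymax (draw_discrete_circle_with_boundaries x y r xmax ymax)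

-- ===== LEMMAS AND PROOFS =====

-- pyIsqrtAux returns the largest root: spec by functional induction
theorem pyIsqrtAux_spec (k m : Nat) (h : m * m ≤ k) :
    pyIsqrtAux k m * pyIsqrtAux k m ≤ k ∧ k < (pyIsqrtAux k m + 1) * (pyIsqrtAux k m + 1) := by
  fun_induction pyIsqrtAux k m with
  | case1 m hle ih => exact ih (by nlinarith)
  | case2 m hlt => omega

theorem pyIsqrt_spec (k : Int) (hk : 0 ≤ k) :
    0 ≤ pyIsqrt k ∧ pyIsqrt k * pyIsqrt k ≤ k ∧ k < (pyIsqrt k + 1) * (pyIsqrt k + 1) := by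
  obtain ⟨h1, h2⟩ := pyIsqrtAux_spec k.toNat 0 (Nat.zero_le _)
  unfold pyIsqrt
  refine ⟨Int.natCast_nonneg _, ?_, ?_⟩
  · exact_mod_cast le_trans (by exact_mod_cast h1) (le_of_eq (Int.toNat_of_nonneg hk))
  · calc k = (k.toNat : Int) := (Int.toNat_of_nonneg hk).symm
      _ < _ := by exact_mod_cast h2

-- filtering a contiguous range by an interval predicate yields the sub-range
theorem filter_pyRange_interval (a b lo hi : Int) (p : Int → Bool)
    (hp : ∀ z, p z = decide (lo ≤ z ∧ z ≤ hi))
    (h1 : a ≤ lo) (h2 : lo ≤ hi + 1) (h3 : hi + 1 ≤ b) :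
    (PySem.List.pyRange a b 1).filter p = PySem.List.pyRange lo (hi + 1) 1 := by
  rw [PySem.List.pyRange_one_append a lo b h1 (by omega),
      PySem.List.pyRange_one_append lo (hi + 1) b h2 h3,
      List.filter_append, List.filter_append]
  rw [List.filter_eq_nil_iff.mpr, List.filter_eq_self.mpr, List.filter_eq_nil_iff.mpr]
  · simp
  · intro z hz
    rw [PySem.List.mem_pyRange_one] at hz
    simp [hp z]; omega
  · intro z hz
    rw [PySem.List.mem_pyRange_one] at hz
    simp [hp z]; omega
  · intro z hz
    rw [PySem.List.mem_pyRange_one] at hz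
    simp [hp z]; omega

-- the disk membership test on one column equals the interval test for the isqrt span
theorem disk_column (r xi : Int) (hxi : -r ≤ xi ∧ xi ≤ r) :
    (PySem.List.pyRange (-r) (r + 1) 1).filter
        (fun y_i => decide (xi * xi + y_i * y_i ≤ r * r)) =
      PySem.List.pyRange (-(pyIsqrt (r * r - xi * xi))) (pyIsqrt (r * r - xi * xi) + 1) 1 := by
  have hr : 0 ≤ r := by omega
  have hk : 0 ≤ r * r - xi * xi := by nlinarith
  obtain ⟨hm0, hm1, hm2⟩ := pyIsqrt_spec _ hk
  set m := pyIsqrt (r * r - xi * xi) with hm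
  have hmr : m ≤ r := by nlinarith
  apply filter_pyRange_interval _ _ _ _ _ _ (by omega) (by omega) (by omega)
  intro z
  by_cases h : -m ≤ z ∧ z ≤ m
  · simp only [h, and_self, decide_true, decide_eq_true_eq]
    nlinarith [sq_nonneg (z - m), sq_nonneg (z + m)]
  · simp only [h, decide_false, decide_eq_false_iff_not]
    intro hle
    apply h
    constructor <;> nlinarith [sq_nonneg z]

-- ===== VERDICT (by name: the statement is the Claim_ definition above) =====
theorem draw_discrete_circle_with_boundaries_spec : Claim_equal_draw_discrete_circle_with_boundaries := by
  intro x y r xmax ymax _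
  unfold Spec_draw_discrete_circle_with_boundaries
  unfold draw_discrete_circle_with_boundaries draw_discrete_circle_with_boundaries_alt
  simp only [PySem.List.foldl_append_ite, PySem.List.foldl_append_eq_flatMap, List.nil_append]
  rw [List.filter_flatMap, List.map_flatMap]
  refine List.flatMap_congr ?_
  intro x_i hxi
  rw [PySem.List.mem_pyRange_one] at hxi
  rw [List.filter_map, List.map_map, disk_column r x_i (by omega)]
  rw [List.filter_congr (q := fun y_i =>
        decide (x_i + x > 0 ∧ x_i + x < xmax ∧ y_i + y > 0 ∧ y_i + y < ymax)) ?_]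
  · refine List.map_congr_left ?_
    intro y_i _
    simp [PySem.List.pyGetD]
  · intro y_i _
    simp [PySem.List.pyGetD]
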